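-- pv_equiv track=rewrite | github.com/Laundry-96/ZipNeighbors | ZipNeighbors.py | adjacent_zips
-- ===== SOURCE A (Python) =====
-- def adjacent_zips(zip_points):
--   adj = {}
--
--   all_zips = zip_points.keys()
--
--   #Find Neighbors
--   for zip1 in zip_points.keys():
--     for zip2 in zip_points.keys():
--       if zip1 == zip2:
--         continue
--       if not zip_points[zip1].isdisjoint(zip_points[zip2]):
--         if zip1 in adj:
--          adj[zip1].append(zip2)
--         else:
--           adj[zip1] = [zip2]
--
--   #Include zips that have no neighbors
--   for zip_code in all_zips:
--     if zip_code not in adj.keys():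
--       adj[zip_code] = []
--
--   return adj
-- ===== SOURCE B (Python) =====
-- def adjacent_zips(zip_points):
--     # Invert to a point -> zips index, then take neighbors of each zip as the
--     # union of the index entries of its points, listed in key order.
--     keys = list(zip_points)
--
--     index = {}
--     for z, pts in zip_points.items():
--         for p in pts:
--             index.setdefault(p, []).append(z)
--
--     neighbored = []
--     lonely = []
--     for z, pts in zip_points.items():
--         cand = set()
--         for p in pts:
--             cand.update(index[p])
--         nbr = [z2 for z2 in keys if z2 != z and z2 in cand]
--         if nbr:
--             neighbored.append((z, nbr))
--         else:
--             lonely.append(z)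
--
--     return dict(neighbored + [(z, []) for z in lonely])
-- ===== Notes on version B (the rewrite author's own statement) =====
-- stated objective: faster
-- what changed: B replaces A's pairwise isdisjoint tests (an O(p) point-set scan for each of the n^2 ordered key pairs) by an inverted point->zips index built in one pass; each zip's candidate neighbors are the union of the index entries of its points, so the per-pair work drops to an O(1) set-membership test, and the result dict is assembled from two lists instead of by dict mutation.
import Mathlib
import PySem

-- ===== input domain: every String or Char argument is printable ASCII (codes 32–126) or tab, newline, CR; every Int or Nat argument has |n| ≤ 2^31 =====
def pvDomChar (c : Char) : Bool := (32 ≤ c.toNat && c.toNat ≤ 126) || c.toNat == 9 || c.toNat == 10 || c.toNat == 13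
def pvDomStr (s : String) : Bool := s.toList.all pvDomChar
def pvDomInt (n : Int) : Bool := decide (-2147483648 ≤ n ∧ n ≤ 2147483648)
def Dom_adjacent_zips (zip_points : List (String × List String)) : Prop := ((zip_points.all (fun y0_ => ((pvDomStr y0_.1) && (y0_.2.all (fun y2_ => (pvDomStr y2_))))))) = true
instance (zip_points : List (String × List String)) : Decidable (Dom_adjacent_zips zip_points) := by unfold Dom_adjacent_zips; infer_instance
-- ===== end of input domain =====

-- B builds a point→zips inverted index and takes each zip's neighbors from the union of the
-- index entries of its points (one O(1) membership test per key pair instead of A's per-pair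
-- point-set intersection scan); the return-value equality below is exact on all inputs.

-- ===== PORT A =====
-- the body of A's inner loop over zip2 (appends zip2 to adj[zip1] when the point sets meet)
def pvInnerStep (zp : PySem.Dict String (List String)) (zip1 : String)
    (adj : PySem.Dict String (List String)) (zip2 : String) : PySem.Dict String (List String) :=
  if zip1 == zip2 then adj
  else if !(PySem.Set.isdisjoint (zp.getD zip1 []) (zp.getD zip2 [])) then
    -- zp.getD … [] is exact: zip1 and zip2 are keys of zp, so the lookup never misses
    (if adj.contains zip1 then adj.modify zip1 [] (fun l => l ++ [zip2])  -- adj[zip1].append(zip2)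
     else adj.insert zip1 [zip2])
  else adj

def adjacent_zips (zip_points : List (String × List String)) : List (String × List String) :=
  let zp : PySem.Dict String (List String) := PySem.Dict.ofList zip_points
  let all_zips := zp.keys
  let adj : PySem.Dict String (List String) :=
    zp.keys.foldl (fun adj zip1 => zp.keys.foldl (pvInnerStep zp zip1) adj) PySem.Dict.empty
  (all_zips.foldl (fun adj z => if !(adj.contains z) then adj.insert z [] else adj) adj).items

-- ===== PORT B =====
-- index.setdefault(p, []).append(z)  is exactly  index[p] = index.get(p, []) + [z]
def pvIndexOf (zp : PySem.Dict String (List String)) : PySem.Dict String (List String) :=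
  zp.items.foldl (fun ix q => q.2.foldl (fun ix p => ix.modify p [] (fun l => l ++ [q.1])) ix)
    PySem.Dict.empty

-- cand = union of index[p] over the points p of one zip (index.getD is exact: p is a key)
def pvCand (index : PySem.Dict String (List String)) (pts : List String) : PySem.Set String :=
  pts.foldl (fun s p => PySem.Set.update s (index.getD p [])) PySem.Set.empty

-- body of B's main loop: file one zip under `neighbored` or `lonely`
def pvAccStep (keys : List String) (index : PySem.Dict String (List String))
    (acc : List (String × List String) × List String) (q : String × List String) :
    List (String × List String) × List String :=
  let nbr := keys.filter (fun z2 => z2 != q.1 && PySem.Set.contains (pvCand index q.2) z2)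
  if nbr.isEmpty then (acc.1, acc.2 ++ [q.1]) else (acc.1 ++ [(q.1, nbr)], acc.2)

def adjacent_zips_alt (zip_points : List (String × List String)) : List (String × List String) :=
  let zp : PySem.Dict String (List String) := PySem.Dict.ofList zip_points
  let keys := zp.keys
  let index := pvIndexOf zp
  let acc := zp.items.foldl (pvAccStep keys index) ([], [])
  -- dict(neighbored + [(z, []) for z in lonely])
  ((acc.1 ++ acc.2.map (fun z => (z, []))).foldl
      (fun (d : PySem.Dict String (List String)) (q : String × List String) => d.insert q.1 q.2)
      PySem.Dict.empty).items

-- ===== PRECONDITION & SPEC =====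
def Spec_adjacent_zips (zip_points : List (String × List String)) (out : List (String × List String)) : Prop := out = adjacent_zips_alt zip_points
instance (zip_points : List (String × List String)) (out : List (String × List String)) : Decidable (Spec_adjacent_zips zip_points out) := by unfold Spec_adjacent_zips; infer_instance

-- ===== CLAIM (what is proved, stated in full; the proofs are below) =====
def Claim_equal_adjacent_zips : Prop := ∀ (zip_points : List (String × List String)), Dom_adjacent_zips zip_points → Spec_adjacent_zips zip_points (adjacent_zips zip_points)

-- ===== LEMMAS AND PROOFS =====

def pvNbrs (zp : PySem.Dict String (List String)) (zip1 : String) : List String :=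
  zp.keys.filter (fun z2 => z2 != zip1 && !(PySem.Set.isdisjoint (zp.getD zip1 []) (zp.getD z2 [])))

-- ----- A side -----

theorem pvInner_spec (zp : PySem.Dict String (List String)) (zip1 : String) :
    ∀ (zs : List String) (d : PySem.Dict String (List String)),
      (zs.foldl (pvInnerStep zp zip1) d).keys
        = d.keys ++ (if !d.contains zip1 && !(zs.filter (fun z2 => z2 != zip1 && !(PySem.Set.isdisjoint (zp.getD zip1 []) (zp.getD z2 [])))).isEmpty then [zip1] else [])
      ∧ (zs.foldl (pvInnerStep zp zip1) d).getD zip1 []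
        = d.getD zip1 [] ++ zs.filter (fun z2 => z2 != zip1 && !(PySem.Set.isdisjoint (zp.getD zip1 []) (zp.getD z2 [])))
      ∧ (∀ z, z ≠ zip1 → (zs.foldl (pvInnerStep zp zip1) d).getD z [] = d.getD z [])
      ∧ (∀ z, (zs.foldl (pvInnerStep zp zip1) d).contains z
            = (d.contains z || (z == zip1 && !(zs.filter (fun z2 => z2 != zip1 && !(PySem.Set.isdisjoint (zp.getD zip1 []) (zp.getD z2 [])))).isEmpty))) := by
  intro zs
  induction zs with
  | nil => intro d; simp [List.foldl]
  | cons z2 zs ih =>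
    intro d
    by_cases h1 : zip1 = z2
    · have hstep : pvInnerStep zp zip1 d z2 = d := by simp [pvInnerStep, h1]
      have hfil : (z2 != zip1) = false := by simp [h1]
      simpa [List.foldl, hstep, List.filter, hfil] using ih d
    · by_cases h2 : (PySem.Set.isdisjoint (zp.getD zip1 []) (zp.getD z2 [])) = true
      · have hstep : pvInnerStep zp zip1 d z2 = d := by
          simp [pvInnerStep, h1, h2]
        have hfil : (z2 != zip1 && !(PySem.Set.isdisjoint (zp.getD zip1 []) (zp.getD z2 []))) = false := by
          simp [h2]
        simpa [List.foldl, hstep, List.filter, hfil] using ih d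
      · set d' := (if d.contains zip1 then d.modify zip1 [] (fun l => l ++ [z2]) else d.insert zip1 [z2]) with hd'
        have hstep : pvInnerStep zp zip1 d z2 = d' := by
          simp [pvInnerStep, h1, h2, hd']
        have hfil : (z2 != zip1 && !(PySem.Set.isdisjoint (zp.getD zip1 []) (zp.getD z2 []))) = true := by
          simp [h2, Ne.symm h1]
        obtain ⟨k1, g1, g2, c1⟩ := ih d'
        have hck : d'.contains zip1 = true := by
          by_cases hc : d.contains zip1 = true
          · simp [hd', hc, PySem.Dict.contains_modify]
          · simp [hd', hc, PySem.Dict.contains_insert]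
        have hkeys' : d'.keys = d.keys ++ (if !d.contains zip1 then [zip1] else []) := by
          by_cases hc : d.contains zip1 = true
          · rw [hd']
            simp only [hc, if_true, Bool.not_true, if_false, List.append_nil]
            rw [PySem.Dict.keys_modify, PySem.Dict.keys_insert_of_contains _ _ hc]; simp
          · have hc' : d.contains zip1 = false := by simpa using hc
            rw [hd']; simp only [hc', Bool.false_eq_true, if_false, Bool.not_false, if_true]
            rw [PySem.Dict.keys_insert_of_not_contains _ _ hc']
        have hgd : d'.getD zip1 [] = d.getD zip1 [] ++ [z2] := by
          by_cases hc : d.contains zip1 = true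
          · rw [hd']; simp only [hc, if_true]
            rw [PySem.Dict.getD_modify]; simp
          · have hc' : d.contains zip1 = false := by simpa using hc
            rw [hd']; simp only [hc', Bool.false_eq_true, if_false]
            rw [PySem.Dict.getD_insert]
            simp [PySem.Dict.getD_of_not_contains _ _ hc']
        have hgo : ∀ z, z ≠ zip1 → d'.getD z [] = d.getD z [] := by
          intro z hz
          by_cases hc : d.contains zip1 = true
          · rw [hd']; simp only [hc, if_true]; rw [PySem.Dict.getD_modify]; simp [hz]
          · have hc' : d.contains zip1 = false := by simpa using hc
            rw [hd']; simp only [hc', Bool.false_eq_true, if_false]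
            rw [PySem.Dict.getD_insert]; simp [hz]
        have hco : ∀ z, d'.contains z = (d.contains z || (z == zip1)) := by
          intro z
          by_cases hc : d.contains zip1 = true
          · rw [hd']; simp only [hc, if_true]
            rw [PySem.Dict.contains_modify]; exact Bool.or_comm _ _
          · have hc' : d.contains zip1 = false := by simpa using hc
            rw [hd']; simp only [hc', Bool.false_eq_true, if_false]
            rw [PySem.Dict.contains_insert]; exact Bool.or_comm _ _
        refine ⟨?_, ?_, ?_, ?_⟩
        · rw [List.foldl_cons, hstep, k1, hkeys', hck]
          simp only [List.filter_cons, hfil, if_true, List.isEmpty_cons, Bool.not_false, Bool.and_true]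
          by_cases hc : d.contains zip1 = true <;> simp [hc]
        · rw [List.foldl_cons, hstep, g1, hgd]
          simp [List.filter_cons, hfil]
        · intro z hz
          rw [List.foldl_cons, hstep, g2 z hz, hgo z hz]
        · intro z
          rw [List.foldl_cons, hstep, c1 z, hco z]
          simp only [List.filter_cons, hfil, if_true, List.isEmpty_cons]
          by_cases hz : z = zip1 <;> by_cases hc : d.contains z = true <;> simp [hz, hc]

theorem pvOuter_spec (zp : PySem.Dict String (List String)) :
    ∀ (ys : List String) (d : PySem.Dict String (List String)),
      (∀ z ∈ ys, d.contains z = false) → ys.Nodup →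
      (ys.foldl (fun adj zip1 => zp.keys.foldl (pvInnerStep zp zip1) adj) d).keys
        = d.keys ++ ys.filter (fun z => !(pvNbrs zp z).isEmpty)
      ∧ (∀ z, (ys.foldl (fun adj zip1 => zp.keys.foldl (pvInnerStep zp zip1) adj) d).getD z []
            = if z ∈ ys then pvNbrs zp z else d.getD z [])
      ∧ (∀ z, (ys.foldl (fun adj zip1 => zp.keys.foldl (pvInnerStep zp zip1) adj) d).contains z = true
            ↔ (d.contains z = true ∨ (z ∈ ys ∧ pvNbrs zp z ≠ []))) := by
  intro ys
  induction ys with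
  | nil => intro d _ _; simp [List.foldl]
  | cons y ys ih =>
    intro d hfresh hnd
    have hy : d.contains y = false := hfresh y (by simp)
    obtain ⟨k1, g1, g2, c1⟩ := pvInner_spec zp y zp.keys d
    set d' := zp.keys.foldl (pvInnerStep zp y) d with hd'
    have hk' : d'.keys = d.keys ++ (if !(pvNbrs zp y).isEmpty then [y] else []) := by
      rw [k1, hy]; rfl
    have hgy : d'.getD y [] = pvNbrs zp y := by
      rw [g1, PySem.Dict.getD_of_not_contains _ _ hy]; rfl
    have hgo : ∀ z, z ≠ y → d'.getD z [] = d.getD z [] := g2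
    have hco : ∀ z, d'.contains z = true ↔ (d.contains z = true ∨ (z = y ∧ pvNbrs zp z ≠ [])) := by
      intro z
      rw [c1 z]
      rw [show (List.filter (fun z2 => z2 != y && !(PySem.Set.isdisjoint (zp.getD y []) (zp.getD z2 []))) zp.keys) = pvNbrs zp y from rfl]
      simp only [Bool.or_eq_true, Bool.and_eq_true, beq_iff_eq, Bool.not_eq_true',
        List.isEmpty_eq_false_iff]
      constructor
      · rintro (h | ⟨rfl, h⟩)
        · exact Or.inl h
        · exact Or.inr ⟨rfl, h⟩
      · rintro (h | ⟨rfl, h⟩)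
        · exact Or.inl h
        · exact Or.inr ⟨rfl, h⟩
    have hy' : y ∉ ys := (List.nodup_cons.mp hnd).1
    have hnd' : ys.Nodup := (List.nodup_cons.mp hnd).2
    have hfresh' : ∀ z ∈ ys, d'.contains z = false := by
      intro z hz
      have hzy : z ≠ y := fun h => hy' (h ▸ hz)
      have : ¬ d'.contains z = true := by
        rw [hco z]
        rintro (h | ⟨rfl, _⟩)
        · rw [hfresh z (by simp [hz])] at h; exact Bool.false_ne_true h
        · exact hzy rfl
      simpa using this
    obtain ⟨K, G, C⟩ := ih d' hfresh' hnd'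
    refine ⟨?_, ?_, ?_⟩
    · rw [List.foldl_cons, K, hk', List.filter_cons]
      by_cases he : (pvNbrs zp y).isEmpty = true <;> simp [he]
    · intro z
      rw [List.foldl_cons, G z]
      by_cases hz : z ∈ ys
      · simp [hz]
      · by_cases hzy : z = y
        · subst hzy; simp [hz, hgy]
        · simp [hz, hzy, hgo z hzy]
    · intro z
      rw [List.foldl_cons, C z, hco z]
      simp only [List.mem_cons]
      constructor
      · rintro ((h | ⟨rfl, h⟩) | ⟨h, h2⟩)
        · exact Or.inl h
        · exact Or.inr ⟨Or.inl rfl, h⟩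
        · exact Or.inr ⟨Or.inr h, h2⟩
      · rintro (h | ⟨(rfl | h), h2⟩)
        · exact Or.inl (Or.inl h)
        · exact Or.inl (Or.inr ⟨rfl, h2⟩)
        · exact Or.inr ⟨h, h2⟩

theorem pvPhase2_spec :
    ∀ (ys : List String) (d : PySem.Dict String (List String)), ys.Nodup →
      (ys.foldl (fun adj z => if !(adj.contains z) then adj.insert z [] else adj) d).keys
        = d.keys ++ ys.filter (fun z => !(d.contains z))
      ∧ (∀ z, (ys.foldl (fun adj z => if !(adj.contains z) then adj.insert z [] else adj) d).getD z []
            = d.getD z []) := by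
  intro ys
  induction ys with
  | nil => intro d _; simp [List.foldl]
  | cons y ys ih =>
    intro d hnd
    have hy' : y ∉ ys := (List.nodup_cons.mp hnd).1
    have hnd' : ys.Nodup := (List.nodup_cons.mp hnd).2
    by_cases hc : d.contains y = true
    · have hstep : (if !(d.contains y) then d.insert y [] else d) = d := by simp [hc]
      obtain ⟨K, G⟩ := ih d hnd'
      refine ⟨?_, ?_⟩
      · rw [List.foldl_cons, hstep, K, List.filter_cons]; simp [hc]
      · intro z; rw [List.foldl_cons, hstep, G z]
    · have hc' : d.contains y = false := by simpa using hc
      have hstep : (if !(d.contains y) then d.insert y [] else d) = d.insert y [] := by simp [hc']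
      obtain ⟨K, G⟩ := ih (d.insert y ([] : List String)) hnd'
      have hfc : ∀ z ∈ ys, (d.insert y ([] : List String)).contains z = d.contains z := by
        intro z hz
        rw [PySem.Dict.contains_insert]
        have : (z == y) = false := by
          simp [show z ≠ y from fun h => hy' (h ▸ hz)]
        simp [this]
      refine ⟨?_, ?_⟩
      · rw [List.foldl_cons, hstep, K, PySem.Dict.keys_insert_of_not_contains _ _ hc',
          List.filter_cons]
        have : ys.filter (fun z => !(d.insert y ([] : List String)).contains z)
             = ys.filter (fun z => !(d.contains z)) := by
          apply List.filter_congr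
          intro z hz; rw [hfc z hz]
        rw [this]; simp [hc']
      · intro z
        rw [List.foldl_cons, hstep, G z, PySem.Dict.getD_insert]
        by_cases hz : z = y
        · subst hz; simp [PySem.Dict.getD_of_not_contains _ _ hc']
        · simp [hz]

theorem pvA_items (l : List (String × List String)) :
    adjacent_zips l
      = ((PySem.Dict.ofList l : PySem.Dict String (List String)).keys.filter
            (fun z => !(pvNbrs (PySem.Dict.ofList l) z).isEmpty)).map
          (fun z => (z, pvNbrs (PySem.Dict.ofList l) z))
        ++ ((PySem.Dict.ofList l : PySem.Dict String (List String)).keys.filter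
            (fun z => (pvNbrs (PySem.Dict.ofList l) z).isEmpty)).map (fun z => (z, ([] : List String))) := by
  unfold adjacent_zips
  set zp : PySem.Dict String (List String) := PySem.Dict.ofList l with hzp
  have hnd : zp.keys.Nodup := PySem.Dict.nodup_keys_ofList l
  obtain ⟨K1, G1, C1⟩ := pvOuter_spec zp zp.keys PySem.Dict.empty
    (fun z _ => PySem.Dict.contains_empty z) hnd
  set d1 := zp.keys.foldl (fun adj zip1 => zp.keys.foldl (pvInnerStep zp zip1) adj)
      (PySem.Dict.empty : PySem.Dict String (List String)) with hd1
  obtain ⟨K2, G2⟩ := pvPhase2_spec zp.keys d1 hnd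
  set d2 := zp.keys.foldl (fun adj z => if !(adj.contains z) then adj.insert z [] else adj) d1 with hd2
  have hK1 : d1.keys = zp.keys.filter (fun z => !(pvNbrs zp z).isEmpty) := by
    rw [K1, PySem.Dict.keys_empty]; rfl
  have hG1 : ∀ z, d1.getD z [] = if z ∈ zp.keys then pvNbrs zp z else [] := by
    intro z; rw [G1 z, PySem.Dict.getD_empty]
  have hfc : zp.keys.filter (fun z => !(d1.contains z)) = zp.keys.filter (fun z => (pvNbrs zp z).isEmpty) := by
    apply List.filter_congr
    intro z hz
    by_cases hc : d1.contains z = true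
    · have := (C1 z).mp hc
      rcases this with h | ⟨_, hne⟩
      · rw [PySem.Dict.contains_empty] at h; exact absurd h Bool.false_ne_true
      · simp [hc, List.isEmpty_eq_false_iff.mpr hne]
    · have hc' : d1.contains z = false := by simpa using hc
      have hnb : pvNbrs zp z = [] := by
        by_contra hne
        exact hc ((C1 z).mpr (Or.inr ⟨hz, hne⟩))
      simp [hc', hnb]
  have hK2 : d2.keys = zp.keys.filter (fun z => !(pvNbrs zp z).isEmpty)
      ++ zp.keys.filter (fun z => (pvNbrs zp z).isEmpty) := by
    rw [K2, hK1, hfc]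
  have hndk : d2.keys.Nodup := by
    rw [hK2]
    refine List.Nodup.append (hnd.filter _) (hnd.filter _) ?_
    intro a ha hb
    have h1 := (List.mem_filter.mp ha).2
    have h2 := (List.mem_filter.mp hb).2
    simp at h1 h2
    rw [h2] at h1; simp at h1
  have hitems := PySem.Dict.items_eq_map_keys d2 hndk ([] : List String)
  rw [hitems, hK2, List.map_append]
  congr 1
  · apply List.map_congr_left
    intro k hk
    have hkk : k ∈ zp.keys := (List.mem_filter.mp hk).1
    rw [G2 k, hG1 k]
    simp [hkk]
  · apply List.map_congr_left
    intro k hk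
    have hkk : k ∈ zp.keys := (List.mem_filter.mp hk).1
    have he : (pvNbrs zp k).isEmpty = true := (List.mem_filter.mp hk).2
    rw [G2 k, hG1 k]
    simp [hkk, List.isEmpty_iff.mp he]

-- ----- B side -----

theorem pvIdx_inner (z0 : String) :
    ∀ (pts : List String) (ix : PySem.Dict String (List String)) (z p : String),
      z ∈ (pts.foldl (fun ix p => ix.modify p [] (fun l => l ++ [z0])) ix).getD p []
        ↔ z ∈ ix.getD p [] ∨ (z = z0 ∧ p ∈ pts) := by
  intro pts
  induction pts with
  | nil => intro ix z p; simp [List.foldl]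
  | cons p' pts ih =>
    intro ix z p
    rw [List.foldl_cons, ih]
    rw [PySem.Dict.getD_modify]
    by_cases hp : p = p'
    · subst hp; simp; try tauto
    · simp [hp]; try tauto


theorem pvIdx_outer :
    ∀ (qs : List (String × List String)) (ix : PySem.Dict String (List String)) (z p : String),
      z ∈ (qs.foldl (fun ix q => q.2.foldl (fun ix p => ix.modify p [] (fun l => l ++ [q.1])) ix) ix).getD p []
        ↔ z ∈ ix.getD p [] ∨ ∃ q ∈ qs, q.1 = z ∧ p ∈ q.2 := by
  intro qs
  induction qs with
  | nil => intro ix z p; simp [List.foldl]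
  | cons q qs ih =>
    intro ix z p
    rw [List.foldl_cons, ih, pvIdx_inner]
    simp only [List.mem_cons]
    constructor
    · rintro ((h | ⟨rfl, hm⟩) | ⟨q', hq', rfl, hm⟩)
      · exact Or.inl h
      · exact Or.inr ⟨q, Or.inl rfl, rfl, hm⟩
      · exact Or.inr ⟨q', Or.inr hq', rfl, hm⟩
    · rintro (h | ⟨q', (rfl | hq'), rfl, hm⟩)
      · exact Or.inl (Or.inl h)
      · exact Or.inl (Or.inr ⟨rfl, hm⟩)
      · exact Or.inr ⟨q', hq', rfl, hm⟩

theorem pvIndex_mem (zp : PySem.Dict String (List String)) (z p : String) :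
    z ∈ (pvIndexOf zp).getD p [] ↔ ∃ q ∈ zp.items, q.1 = z ∧ p ∈ q.2 := by
  unfold pvIndexOf
  rw [pvIdx_outer]
  simp [PySem.Dict.getD_empty]

theorem pvCand_mem_gen (index : PySem.Dict String (List String)) :
    ∀ (pts : List String) (s : PySem.Set String) (z2 : String),
      z2 ∈ pts.foldl (fun s p => PySem.Set.update s (index.getD p [])) s
        ↔ z2 ∈ s ∨ ∃ p ∈ pts, z2 ∈ index.getD p [] := by
  intro pts
  induction pts with
  | nil => intro s z2; simp [List.foldl]
  | cons p pts ih =>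
    intro s z2
    rw [List.foldl_cons, ih]
    rw [PySem.Set.mem_update]
    simp only [List.mem_cons]
    constructor
    · rintro ((h | h) | ⟨p', hp', hm⟩)
      · exact Or.inl h
      · exact Or.inr ⟨p, Or.inl rfl, h⟩
      · exact Or.inr ⟨p', Or.inr hp', hm⟩
    · rintro (h | ⟨p', (rfl | hp'), hm⟩)
      · exact Or.inl (Or.inl h)
      · exact Or.inl (Or.inr hm)
      · exact Or.inr ⟨p', hp', hm⟩

theorem pvCand_mem (index : PySem.Dict String (List String)) (pts : List String) (z2 : String) :
    z2 ∈ pvCand index pts ↔ ∃ p ∈ pts, z2 ∈ index.getD p [] := by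
  unfold pvCand
  rw [pvCand_mem_gen]
  simp [PySem.Set.empty]

theorem pvGetD_of_mem_keys (zp : PySem.Dict String (List String)) (hnd : zp.keys.Nodup)
    (z : String) (hz : z ∈ zp.keys) : (z, zp.getD z []) ∈ zp.items := by
  have h1 : zp.get? z ≠ none := by
    intro h
    exact (PySem.Dict.get?_eq_none_iff_not_mem_keys zp z).mp h hz
  obtain ⟨v, hv⟩ := Option.ne_none_iff_exists'.mp h1
  have hmem := (PySem.Dict.get?_eq_some_iff_mem_items zp z v hnd).mp hv
  have : zp.getD z [] = v := PySem.Dict.getD_of_mem_items zp hmem hnd []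
  rw [this]; exact hmem

theorem pvNbrB_eq (zp : PySem.Dict String (List String)) (hnd : zp.keys.Nodup)
    (q : String × List String) (hq : q ∈ zp.items) :
    zp.keys.filter (fun z2 => z2 != q.1 && PySem.Set.contains (pvCand (pvIndexOf zp) q.2) z2)
      = pvNbrs zp q.1 := by
  unfold pvNbrs
  apply List.filter_congr
  intro z2 hz2
  by_cases hzq : z2 = q.1
  · simp [hzq]
  · have hq2 : zp.getD q.1 [] = q.2 := by
      have : (q.1, q.2) ∈ zp.items := by simpa using hq
      exact PySem.Dict.getD_of_mem_items zp this hnd []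
    have key : PySem.Set.contains (pvCand (pvIndexOf zp) q.2) z2
        = !(PySem.Set.isdisjoint (zp.getD q.1 []) (zp.getD z2 [])) := by
      rw [Bool.eq_iff_iff]
      rw [PySem.Set.contains_iff, pvCand_mem]
      constructor
      · rintro ⟨p, hp, hidx⟩
        obtain ⟨q', hq', hfst, hpq'⟩ := (pvIndex_mem zp z2 p).mp hidx
        have hq'items : (z2, q'.2) ∈ zp.items := by
          rw [← hfst]; simpa using hq'
        have hgd2 : zp.getD z2 [] = q'.2 := PySem.Dict.getD_of_mem_items zp hq'items hnd []
        simp only [Bool.not_eq_true']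
        rw [← Bool.not_eq_true, PySem.Set.isdisjoint_iff]
        push_neg
        exact ⟨p, by rw [hq2]; exact hp, by rw [hgd2]; exact hpq'⟩
      · intro hbd
        have : ¬ (PySem.Set.isdisjoint (zp.getD q.1 []) (zp.getD z2 []) = true) := by
          rw [Bool.not_eq_true]; simpa using hbd
        rw [PySem.Set.isdisjoint_iff] at this
        push_neg at this
        obtain ⟨p, hp1, hp2⟩ := this
        refine ⟨p, by rw [← hq2]; exact hp1, ?_⟩
        rw [pvIndex_mem]
        have hz2k : z2 ∈ zp.keys := hz2
        exact ⟨(z2, zp.getD z2 []), pvGetD_of_mem_keys zp hnd z2 hz2k, rfl, hp2⟩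
    rw [key]


theorem pvAcc_spec (keys : List String) (index : PySem.Dict String (List String)) :
    ∀ (qs : List (String × List String)) (accN : List (String × List String)) (accL : List String),
      qs.foldl (pvAccStep keys index) (accN, accL)
        = (accN ++ (qs.filter (fun q => !((keys.filter (fun z2 => z2 != q.1 && PySem.Set.contains (pvCand index q.2) z2)).isEmpty))).map
              (fun q => (q.1, keys.filter (fun z2 => z2 != q.1 && PySem.Set.contains (pvCand index q.2) z2))),
           accL ++ (qs.filter (fun q => (keys.filter (fun z2 => z2 != q.1 && PySem.Set.contains (pvCand index q.2) z2)).isEmpty)).map (fun q => q.1)) := by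
  intro qs
  induction qs with
  | nil => intro accN accL; simp [List.foldl]
  | cons q qs ih =>
    intro accN accL
    rw [List.foldl_cons]
    by_cases he : (keys.filter (fun z2 => z2 != q.1 && PySem.Set.contains (pvCand index q.2) z2)).isEmpty = true
    · have hstep : pvAccStep keys index (accN, accL) q = (accN, accL ++ [q.1]) := by
        simp only [pvAccStep, he, if_true]
      rw [hstep, ih]
      simp only [List.filter_cons, he, if_true, Bool.not_true, Bool.false_eq_true, if_false,
        List.map_cons, List.append_assoc, List.cons_append, List.nil_append, List.singleton_append]
    · have hstep : pvAccStep keys index (accN, accL) q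
          = (accN ++ [(q.1, keys.filter (fun z2 => z2 != q.1 && PySem.Set.contains (pvCand index q.2) z2))], accL) := by
        simp only [pvAccStep]
        rw [if_neg he]
      rw [hstep, ih]
      have he2 : (!(List.filter (fun z2 => z2 != q.1 && (pvCand index q.2).contains z2) keys).isEmpty) = true := by
        simpa using he
      simp only [List.filter_cons]
      rw [if_pos he2, if_neg he]
      simp [List.append_assoc]

theorem pvB_items (l : List (String × List String)) :
    adjacent_zips_alt l
      = ((PySem.Dict.ofList l : PySem.Dict String (List String)).keys.filter
            (fun z => !(pvNbrs (PySem.Dict.ofList l) z).isEmpty)).map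
          (fun z => (z, pvNbrs (PySem.Dict.ofList l) z))
        ++ ((PySem.Dict.ofList l : PySem.Dict String (List String)).keys.filter
            (fun z => (pvNbrs (PySem.Dict.ofList l) z).isEmpty)).map (fun z => (z, ([] : List String))) := by
  unfold adjacent_zips_alt
  dsimp only
  set zp : PySem.Dict String (List String) := PySem.Dict.ofList l with hzp
  have hnd : zp.keys.Nodup := PySem.Dict.nodup_keys_ofList l
  rw [pvAcc_spec]
  simp only [List.nil_append]
  have hfix : ∀ q ∈ zp.items,
      zp.keys.filter (fun z2 => z2 != q.1 && PySem.Set.contains (pvCand (pvIndexOf zp) q.2) z2)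
        = pvNbrs zp q.1 := pvNbrB_eq zp hnd
  have hstep1 : (zp.items.filter (fun q => !((zp.keys.filter (fun z2 => z2 != q.1 && PySem.Set.contains (pvCand (pvIndexOf zp) q.2) z2)).isEmpty))).map
        (fun q => (q.1, zp.keys.filter (fun z2 => z2 != q.1 && PySem.Set.contains (pvCand (pvIndexOf zp) q.2) z2)))
      = (zp.keys.filter (fun z => !(pvNbrs zp z).isEmpty)).map (fun z => (z, pvNbrs zp z)) := by
    have h1 : zp.items.filter (fun q => !((zp.keys.filter (fun z2 => z2 != q.1 && PySem.Set.contains (pvCand (pvIndexOf zp) q.2) z2)).isEmpty))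
        = zp.items.filter (fun q => !(pvNbrs zp q.1).isEmpty) := by
      apply List.filter_congr; intro q hq; rw [hfix q hq]
    rw [h1]
    have h2 : ∀ q ∈ zp.items.filter (fun q => !(pvNbrs zp q.1).isEmpty),
        ((q.1, zp.keys.filter (fun z2 => z2 != q.1 && PySem.Set.contains (pvCand (pvIndexOf zp) q.2) z2)) : String × List String)
          = (q.1, pvNbrs zp q.1) := by
      intro q hq; rw [hfix q (List.mem_of_mem_filter hq)]
    rw [List.map_congr_left h2]
    rw [PySem.Dict.items_eq_map_keys zp hnd ([] : List String)]
    rw [List.filter_map, List.map_map]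
    rfl
  have hstep2 : (zp.items.filter (fun q => (zp.keys.filter (fun z2 => z2 != q.1 && PySem.Set.contains (pvCand (pvIndexOf zp) q.2) z2)).isEmpty)).map (fun q => q.1)
      = zp.keys.filter (fun z => (pvNbrs zp z).isEmpty) := by
    have h1 : zp.items.filter (fun q => (zp.keys.filter (fun z2 => z2 != q.1 && PySem.Set.contains (pvCand (pvIndexOf zp) q.2) z2)).isEmpty)
        = zp.items.filter (fun q => (pvNbrs zp q.1).isEmpty) := by
      apply List.filter_congr; intro q hq; rw [hfix q hq]
    rw [h1]
    rw [PySem.Dict.items_eq_map_keys zp hnd ([] : List String)]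
    rw [List.filter_map, List.map_map]
    have : ((fun (q : String × List String) => q.1) ∘ (fun k => (k, zp.getD k []))) = fun k => k := rfl
    rw [this, List.map_id']
    rfl
  rw [hstep1, hstep2]
  have hndR : (((zp.keys.filter (fun z => !(pvNbrs zp z).isEmpty)).map (fun z => (z, pvNbrs zp z))
        ++ ((zp.keys.filter (fun z => (pvNbrs zp z).isEmpty)).map (fun z => (z, ([] : List String))))).map Prod.fst).Nodup := by
    rw [List.map_append, List.map_map, List.map_map]
    have e1 : ((Prod.fst ∘ fun z => ((z, pvNbrs zp z) : String × List String))) = fun z => z := rfl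
    have e2 : ((Prod.fst ∘ fun z => ((z, ([] : List String)) : String × List String))) = fun z => z := rfl
    rw [e1, e2, List.map_id', List.map_id']
    refine List.Nodup.append (hnd.filter _) (hnd.filter _) ?_
    intro a ha hb
    have h1 := (List.mem_filter.mp ha).2
    have h2 := (List.mem_filter.mp hb).2
    simp at h1 h2
    rw [h2] at h1; simp at h1
  have hfresh : ∀ a ∈ ((zp.keys.filter (fun z => !(pvNbrs zp z).isEmpty)).map (fun z => (z, pvNbrs zp z))
        ++ ((zp.keys.filter (fun z => (pvNbrs zp z).isEmpty)).map (fun z => (z, ([] : List String))))),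
      (PySem.Dict.empty : PySem.Dict String (List String)).contains a.1 = false := by
    intro a _; exact PySem.Dict.contains_empty a.1
  have hfold := PySem.Dict.items_foldl_insert_fresh
      (((zp.keys.filter (fun z => !(pvNbrs zp z).isEmpty)).map (fun z => (z, pvNbrs zp z))
        ++ ((zp.keys.filter (fun z => (pvNbrs zp z).isEmpty)).map (fun z => (z, ([] : List String))))))
      Prod.fst Prod.snd PySem.Dict.empty hfresh hndR
  rw [hfold]
  simp [Function.comp_def]
  rfl

-- ===== VERDICT (by name: the statement is the Claim_ definition above) =====
theorem adjacent_zips_spec : Claim_equal_adjacent_zips := by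
  intro l _
  unfold Spec_adjacent_zips
  rw [pvA_items, pvB_items]
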